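-- pv_equiv track=rewrite | github.com/ValentinGiorgetti/ScrabbleAR | Componentes/Tablero.py | contar_puntos_jugador
-- ===== SOURCE A (Python) =====
-- def contar_puntos_jugador(posiciones_ocupadas, casillas_especiales, bolsa_de_fichas, letras_jugador):
--   '''
--   Función que retorna la cantidad de puntos de una jugada, teniendo en cuenta
--   las casillas especiales (modificadores)
--   '''
--   multiplicador = 0
--   puntos = 0
--   for posicion in posiciones_ocupadas:
--     puntos += bolsa_de_fichas[letras_jugador[posiciones_ocupadas[posicion]]]['puntaje_ficha']
--     if (posicion in casillas_especiales):
--       if (casillas_especiales[posicion]['modificador'] < 10):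
--         puntos += casillas_especiales[posicion]['modificador']
--       else:
--         multiplicador += (casillas_especiales[posicion]['modificador'] % 10)
--   if (puntos < 0):
--     return 0
--   else:
--     return puntos if multiplicador == 0 else puntos * multiplicador
-- ===== SOURCE B (Python) =====
-- def contar_puntos_jugador(posiciones_ocupadas, casillas_especiales, bolsa_de_fichas, letras_jugador):
--     '''
--     Different decomposition: a frequency table of the letters played drives the
--     base score (each distinct letter scored once, weighted by its count), and the
--     modifier pass walks casillas_especiales instead of the play, testing membership
--     in posiciones_ocupadas; integer sums commute, so the traversal order is irrelevant.
--     '''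
--     conteo = {}
--     for letra in posiciones_ocupadas.values():
--         conteo[letra] = conteo.get(letra, 0) + 1
--     puntos = sum(bolsa_de_fichas[letras_jugador[l]]['puntaje_ficha'] * c
--                  for l, c in conteo.items())
--     multiplicador = 0
--     for posicion, datos in casillas_especiales.items():
--         if posicion in posiciones_ocupadas:
--             m = datos['modificador']
--             if m < 10:
--                 puntos += m
--             else:
--                 multiplicador += m % 10
--     if puntos < 0:
--         return 0
--     return puntos if multiplicador == 0 else puntos * multiplicador
-- ===== Notes on version B (the rewrite author's own statement) =====
-- stated objective: alternative
-- what changed: Replaces A's single interleaved loop over the play carrying (puntos, multiplicador) state with a letter-frequency table that scores each distinct letter once weighted by its count, plus a modifier pass that traverses casillas_especiales (testing membership in the play) instead of traversing the play; integer sums commute, so the swapped traversal is exact.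
import Mathlib
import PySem

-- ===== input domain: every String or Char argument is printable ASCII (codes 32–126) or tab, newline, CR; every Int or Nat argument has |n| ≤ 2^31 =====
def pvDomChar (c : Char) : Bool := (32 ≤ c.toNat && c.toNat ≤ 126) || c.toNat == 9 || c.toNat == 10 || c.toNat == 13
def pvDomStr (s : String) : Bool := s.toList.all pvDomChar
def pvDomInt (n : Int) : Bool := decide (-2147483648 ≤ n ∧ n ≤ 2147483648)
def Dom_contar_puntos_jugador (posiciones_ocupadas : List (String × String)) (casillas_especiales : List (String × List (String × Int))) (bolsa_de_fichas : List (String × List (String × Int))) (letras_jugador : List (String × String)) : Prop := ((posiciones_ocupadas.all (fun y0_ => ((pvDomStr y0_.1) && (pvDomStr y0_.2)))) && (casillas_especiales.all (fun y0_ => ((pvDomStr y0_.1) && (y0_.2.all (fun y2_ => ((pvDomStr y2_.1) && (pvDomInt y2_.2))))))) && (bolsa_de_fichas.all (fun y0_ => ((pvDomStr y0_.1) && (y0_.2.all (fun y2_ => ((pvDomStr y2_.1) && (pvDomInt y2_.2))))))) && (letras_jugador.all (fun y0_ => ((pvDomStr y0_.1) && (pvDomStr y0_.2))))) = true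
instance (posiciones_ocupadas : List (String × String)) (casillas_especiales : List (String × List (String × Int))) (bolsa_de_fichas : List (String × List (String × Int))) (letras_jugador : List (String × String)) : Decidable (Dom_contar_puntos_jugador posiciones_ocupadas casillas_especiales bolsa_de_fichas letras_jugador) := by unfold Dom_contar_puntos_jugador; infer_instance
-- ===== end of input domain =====

-- B replaces A's single loop over the play (interleaved puntos/multiplicador state) with a
-- letter-frequency table driving the base score and a modifier pass that walks
-- casillas_especiales instead (objective: alternative decomposition; sums of ints commute).

-- ===== PORT A =====
-- shared lookup helper: bolsa_de_fichas[letras_jugador[v]]['puntaje_ficha'] (dict[k] = first-match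
-- lookup; the `getD 0` default is never reached inside Pre_, which excludes the KeyError inputs)
def pvChipScore (bolsa_de_fichas : List (String × List (String × Int))) (letras_jugador : List (String × String)) (v : String) : Int :=
  ((((letras_jugador.lookup v).bind (fun l => bolsa_de_fichas.lookup l)).bind
      (fun ficha => ficha.lookup "puntaje_ficha")).getD 0)

def pvModificador (cas : List (String × Int)) : Int := (cas.lookup "modificador").getD 0

def contar_puntos_jugador (posiciones_ocupadas : List (String × String)) (casillas_especiales : List (String × List (String × Int))) (bolsa_de_fichas : List (String × List (String × Int))) (letras_jugador : List (String × String)) : Int :=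
  let st := posiciones_ocupadas.foldl (fun (st : Int × Int) pv =>
    let puntos := st.2 + pvChipScore bolsa_de_fichas letras_jugador pv.2
    match casillas_especiales.lookup pv.1 with
    | some cas =>
        if pvModificador cas < 10 then (st.1, puntos + pvModificador cas)
        else (st.1 + PySem.Int.mod (pvModificador cas) 10, puntos)
    | none => (st.1, puntos)) (0, 0)
  if st.2 < 0 then 0 else if st.1 = 0 then st.2 else st.2 * st.1

-- ===== PORT B =====
def contar_puntos_jugador_alt (posiciones_ocupadas : List (String × String)) (casillas_especiales : List (String × List (String × Int))) (bolsa_de_fichas : List (String × List (String × Int))) (letras_jugador : List (String × String)) : Int :=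
  -- conteo[letra] = conteo.get(letra, 0) + 1 over posiciones_ocupadas.values()
  let conteo := (posiciones_ocupadas.map (fun pv => pv.2)).foldl
      (fun (d : PySem.Dict String Int) letra => d.insert letra (d.getD letra 0 + 1)) PySem.Dict.empty
  let base := (conteo.items.map (fun lc => pvChipScore bolsa_de_fichas letras_jugador lc.1 * lc.2)).sum
  -- modifier pass over casillas_especiales.items(), membership test against posiciones_ocupadas
  let st := casillas_especiales.foldl (fun (st : Int × Int) pc =>
      if (posiciones_ocupadas.lookup pc.1).isSome then
        let m := pvModificador pc.2
        if m < 10 then (st.1 + m, st.2) else (st.1, st.2 + PySem.Int.mod m 10)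
      else st) (base, 0)
  if st.1 < 0 then 0 else if st.2 = 0 then st.1 else st.1 * st.2

-- ===== PRECONDITION & SPEC =====
-- Pre_ excludes (a) the inputs on which Python A raises KeyError (an occupied position whose value
-- is missing from letras_jugador, whose letter is missing from bolsa_de_fichas or lacks
-- 'puntaje_ficha', or a matched special cell lacking 'modificador'), and (b) association lists with
-- duplicate keys in posiciones_ocupadas or casillas_especiales, which do not represent any Python
-- dict (dict keys are unique) and on which the two traversal orders are accidental.
def Pre_contar_puntos_jugador (posiciones_ocupadas : List (String × String)) (casillas_especiales : List (String × List (String × Int))) (bolsa_de_fichas : List (String × List (String × Int))) (letras_jugador : List (String × String)) : Prop :=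
  (posiciones_ocupadas.map Prod.fst).Nodup ∧
  (casillas_especiales.map Prod.fst).Nodup ∧
  (posiciones_ocupadas.all (fun pv =>
     ((((letras_jugador.lookup pv.2).bind (fun l => bolsa_de_fichas.lookup l)).bind
         (fun ficha => ficha.lookup "puntaje_ficha")).isSome)
     &&
     (match casillas_especiales.lookup pv.1 with
      | some cas => (cas.lookup "modificador").isSome
      | none => true))) = true
instance (posiciones_ocupadas : List (String × String)) (casillas_especiales : List (String × List (String × Int))) (bolsa_de_fichas : List (String × List (String × Int))) (letras_jugador : List (String × String)) : Decidable (Pre_contar_puntos_jugador posiciones_ocupadas casillas_especiales bolsa_de_fichas letras_jugador) := by unfold Pre_contar_puntos_jugador; infer_instance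

def pvWitness_contar_puntos_jugador : (List (String × String)) × (List (String × List (String × Int))) × (List (String × List (String × Int))) × (List (String × String)) :=
  ([("0-0", "A"), ("1-1", "B")],
   [("0-0", [("modificador", 2)]), ("1-1", [("modificador", 12)])],
   [("X", [("puntaje_ficha", 3)]), ("Y", [("puntaje_ficha", -1)])],
   [("A", "X"), ("B", "Y")])

def Spec_contar_puntos_jugador (posiciones_ocupadas : List (String × String)) (casillas_especiales : List (String × List (String × Int))) (bolsa_de_fichas : List (String × List (String × Int))) (letras_jugador : List (String × String)) (out : Int) : Prop := out = contar_puntos_jugador_alt posiciones_ocupadas casillas_especiales bolsa_de_fichas letras_jugador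
instance (posiciones_ocupadas : List (String × String)) (casillas_especiales : List (String × List (String × Int))) (bolsa_de_fichas : List (String × List (String × Int))) (letras_jugador : List (String × String)) (out : Int) : Decidable (Spec_contar_puntos_jugador posiciones_ocupadas casillas_especiales bolsa_de_fichas letras_jugador out) := by unfold Spec_contar_puntos_jugador; infer_instance

-- ===== CLAIM (what is proved, stated in full; the proofs are below) =====
def Claim_equal_contar_puntos_jugador : Prop := ∀ (posiciones_ocupadas : List (String × String)) (casillas_especiales : List (String × List (String × Int))) (bolsa_de_fichas : List (String × List (String × Int))) (letras_jugador : List (String × String)), Dom_contar_puntos_jugador posiciones_ocupadas casillas_especiales bolsa_de_fichas letras_jugador → Pre_contar_puntos_jugador posiciones_ocupadas casillas_especiales bolsa_de_fichas letras_jugador → Spec_contar_puntos_jugador posiciones_ocupadas casillas_especiales bolsa_de_fichas letras_jugador (contar_puntos_jugador posiciones_ocupadas casillas_especiales bolsa_de_fichas letras_jugador)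

-- ===== LEMMAS AND PROOFS =====

-- A's loop from an arbitrary accumulator = the accumulator shifted by three map-sums over the play.
theorem pvA_fold_eq (casillas_especiales : List (String × List (String × Int))) (bolsa_de_fichas : List (String × List (String × Int))) (letras_jugador : List (String × String)) (l : List (String × String)) (mu pu : Int) :
    l.foldl (fun (st : Int × Int) pv =>
      let puntos := st.2 + pvChipScore bolsa_de_fichas letras_jugador pv.2
      match casillas_especiales.lookup pv.1 with
      | some cas =>
          if pvModificador cas < 10 then (st.1, puntos + pvModificador cas)
          else (st.1 + PySem.Int.mod (pvModificador cas) 10, puntos)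
      | none => (st.1, puntos)) (mu, pu)
    = (mu + (l.map (fun pv => match casillas_especiales.lookup pv.1 with
                | some c => if pvModificador c < 10 then 0 else PySem.Int.mod (pvModificador c) 10
                | none => 0)).sum,
       pu + (l.map (fun pv => pvChipScore bolsa_de_fichas letras_jugador pv.2)).sum
          + (l.map (fun pv => match casillas_especiales.lookup pv.1 with
                | some c => if pvModificador c < 10 then pvModificador c else 0
                | none => 0)).sum) := by
  induction l generalizing mu pu with
  | nil => simp
  | cons pv l ih =>
    simp only [List.foldl_cons, List.map_cons, List.sum_cons]
    cases h : casillas_especiales.lookup pv.1 with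
    | none => rw [ih]; rw [Prod.mk.injEq]; constructor <;> ring
    | some c =>
      by_cases hm : pvModificador c < 10
      · simp only [if_pos hm]; rw [ih]; rw [Prod.mk.injEq]; constructor <;> ring
      · simp only [if_neg hm]; rw [ih]; rw [Prod.mk.injEq]; constructor <;> ring

-- B's modifier loop from an arbitrary accumulator = the accumulator shifted by two map-sums
-- over casillas_especiales.
theorem pvB_fold_eq (posiciones_ocupadas : List (String × String)) (l : List (String × List (String × Int))) (pu mu : Int) :
    l.foldl (fun (st : Int × Int) pc =>
      if (posiciones_ocupadas.lookup pc.1).isSome then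
        let m := pvModificador pc.2
        if m < 10 then (st.1 + m, st.2) else (st.1, st.2 + PySem.Int.mod m 10)
      else st) (pu, mu)
    = (pu + (l.map (fun pc => if (posiciones_ocupadas.lookup pc.1).isSome then
                (if pvModificador pc.2 < 10 then pvModificador pc.2 else 0) else 0)).sum,
       mu + (l.map (fun pc => if (posiciones_ocupadas.lookup pc.1).isSome then
                (if pvModificador pc.2 < 10 then 0 else PySem.Int.mod (pvModificador pc.2) 10) else 0)).sum) := by
  induction l generalizing pu mu with
  | nil => simp
  | cons pc l ih =>
    simp only [List.foldl_cons, List.map_cons, List.sum_cons]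
    by_cases hmem : (posiciones_ocupadas.lookup pc.1).isSome
    · simp only [if_pos hmem]
      by_cases hm : pvModificador pc.2 < 10
      · simp only [if_pos hm]; rw [ih]; rw [Prod.mk.injEq]; constructor <;> ring
      · simp only [if_neg hm]; rw [ih]; rw [Prod.mk.injEq]; constructor <;> ring
    · simp only [if_neg hmem]; rw [ih]; rw [Prod.mk.injEq]; constructor <;> ring

-- an equality-indicator sum over a list not containing the pivot is 0
theorem pv_sum_ite_zero (S : List String) (v : String) (c : Int) (h : v ∉ S) :
    (S.map (fun k => if k = v then c else 0)).sum = 0 := by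
  apply List.sum_eq_zero
  intro x hx
  rcases List.mem_map.mp hx with ⟨k, hk, rfl⟩
  simp [show k ≠ v from fun he => h (he ▸ hk)]

-- … and over a duplicate-free list containing it, c
theorem pv_sum_ite_mem (S : List String) (hS : S.Nodup) (v : String) (c : Int) (hv : v ∈ S) :
    (S.map (fun k => if k = v then c else 0)).sum = c := by
  induction S with
  | nil => exact absurd hv (List.not_mem_nil)
  | cons x s ih =>
    rcases List.nodup_cons.mp hS with ⟨hx, hnds⟩
    rcases List.mem_cons.mp hv with h | h
    · subst h
      simp [pv_sum_ite_zero s v c hx]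
    · have hx' : x ≠ v := fun he => hx (he ▸ h)
      simp only [List.map_cons, List.sum_cons, if_neg hx', zero_add]
      exact ih hnds h

-- a keyed indicator summed over an assoc list with distinct keys
theorem pv_sum_ite_key (pos : List (String × String)) (hpos : (pos.map Prod.fst).Nodup) (k : String) (c : Int) :
    (pos.map (fun pv => if pv.1 = k then c else 0)).sum = if (pos.lookup k).isSome then c else 0 := by
  have : (pos.map (fun pv => if pv.1 = k then c else 0))
       = ((pos.map Prod.fst).map (fun x => if x = k then c else 0)) := by
    rw [List.map_map]; rfl
  rw [this]
  by_cases hk : k ∈ pos.map Prod.fst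
  · rw [pv_sum_ite_mem _ hpos k c hk]
    have : (pos.lookup k).isSome := by
      rw [List.lookup_isSome_iff]
      rcases List.mem_map.mp hk with ⟨p, hp, rfl⟩
      exact ⟨p, hp, by simp⟩
    simp [this]
  · rw [pv_sum_ite_zero _ k c hk]
    have : pos.lookup k = none := by
      rw [List.lookup_eq_none_iff]
      intro p hp
      simp only [bne_iff_ne, ne_eq]
      exact fun he => hk (he ▸ List.mem_map_of_mem hp)
    simp [this]

-- TRAVERSAL SWAP: summing a weight of the matched special cell over the play equals summing it
-- over casillas_especiales filtered by membership in the play (keys distinct on both sides).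
theorem pv_sum_swap (pos : List (String × String)) (cas : List (String × List (String × Int))) (w : List (String × Int) → Int) (hpos : (pos.map Prod.fst).Nodup) (hcas : (cas.map Prod.fst).Nodup) :
    (pos.map (fun pv => match cas.lookup pv.1 with | some c => w c | none => 0)).sum
    = (cas.map (fun pc => if (pos.lookup pc.1).isSome then w pc.2 else 0)).sum := by
  induction cas with
  | nil =>
    simp only [List.lookup_nil, List.map_nil, List.sum_nil]
    exact List.sum_eq_zero (by intro x hx; rcases List.mem_map.mp hx with ⟨p, _, rfl⟩; rfl)
  | cons pc cas ih =>
    rw [List.map_cons] at hcas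
    rcases List.nodup_cons.mp hcas with ⟨hnotin, hnd⟩
    have hnone : cas.lookup pc.1 = none := by
      rw [List.lookup_eq_none_iff]
      intro p hp
      simp only [bne_iff_ne, ne_eq]
      exact fun h => hnotin (h ▸ List.mem_map_of_mem hp)
    have hlc : ∀ (k : String), ((pc :: cas).lookup k : Option (List (String × Int)))
        = if k == pc.1 then some pc.2 else cas.lookup k := by
      intro k
      rcases pc with ⟨a, b⟩
      cases h : k == a <;> simp [List.lookup_cons, h]
    have hpoint : ∀ pv ∈ pos,
        (match ((pc :: cas).lookup pv.1 : Option (List (String × Int))) with | some c => w c | none => 0)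
          = (match (cas.lookup pv.1 : Option (List (String × Int))) with | some c => w c | none => 0)
            + (if pv.1 = pc.1 then w pc.2 else 0) := by
      intro pv _
      rw [hlc pv.1]
      by_cases hk : pv.1 = pc.1
      · have hb : (pv.1 == pc.1) = true := by simp [hk]
        have hn2 : cas.lookup pv.1 = none := by rw [hk]; exact hnone
        rw [if_pos hb, if_pos hk, hn2]
        simp
      · have hb : ¬ ((pv.1 == pc.1) = true) := by simp [hk]
        rw [if_neg hb, if_neg hk, add_zero]
    rw [List.map_congr_left hpoint, PySem.List.sum_map_add_int, ih hnd,
      pv_sum_ite_key pos hpos pc.1 (w pc.2)]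
    simp only [List.map_cons, List.sum_cons]
    ring

-- COUNTER: the frequency-table weighted sum equals the per-tile sum over the play's letters.
theorem pv_sum_count_ofList (f : String → Int) (vs : List String) :
    ((PySem.Set.ofList vs).map (fun k => f k * ((vs.count k : Nat) : Int))).sum
      = (vs.map f).sum := by
  induction vs using List.reverseRecOn with
  | nil => simp [PySem.Set.ofList]
  | append_singleton vs v ih =>
    rw [PySem.Set.ofList_append_singleton]
    by_cases hv : v ∈ PySem.Set.ofList vs
    · rw [PySem.Set.add_of_mem hv]
      have hpoint : ∀ k ∈ PySem.Set.ofList vs,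
          f k * (((vs ++ [v]).count k : Nat) : Int)
            = f k * ((vs.count k : Nat) : Int) + (if k = v then f v else 0) := by
        intro k _
        by_cases hk : k = v
        · subst hk
          rw [List.count_append, (by simp : List.count k [k] = 1), if_pos rfl]
          push_cast
          ring
        · have hb : (v == k) = false := by simp [Ne.symm hk]
          rw [List.count_append, List.count_singleton, hb, if_neg hk]
          simp
      rw [List.map_congr_left hpoint, PySem.List.sum_map_add_int, ih,
        pv_sum_ite_mem _ (PySem.Set.nodup_ofList vs) v (f v) hv, List.map_append]
      simp
    · rw [PySem.Set.add_of_not_mem hv, List.map_append, List.map_append]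
      have hvv : v ∉ vs := fun h => hv ((PySem.Set.mem_ofList vs v).mpr h)
      have hpoint : ∀ k ∈ PySem.Set.ofList vs,
          f k * (((vs ++ [v]).count k : Nat) : Int) = f k * ((vs.count k : Nat) : Int) := by
        intro k hk
        have hb : (v == k) = false := by
          simp only [beq_eq_false_iff_ne, ne_eq]
          exact fun he => hv (he ▸ hk)
        rw [List.count_append, List.count_singleton, hb]
        simp
      rw [List.map_congr_left hpoint, List.sum_append, List.sum_append, ih]
      simp [List.count_eq_zero_of_not_mem hvv]

-- ===== VERDICT (by name: the statement is the Claim_ definition above) =====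
theorem contar_puntos_jugador_spec : Claim_equal_contar_puntos_jugador := by
  intro pos cas bolsa letras _ hpre
  rcases hpre with ⟨hpos, hcas, _⟩
  unfold Spec_contar_puntos_jugador contar_puntos_jugador contar_puntos_jugador_alt
  simp only [pvA_fold_eq, pvB_fold_eq, PySem.Dict.foldl_insert_getD_add_one_eq_counter,
    PySem.Dict.items_counter, List.map_map]
  have hbase : ((PySem.Set.ofList (pos.map (fun pv => pv.2))).map
        ((fun lc => pvChipScore bolsa letras lc.1 * lc.2) ∘ fun k => (k, (((pos.map (fun pv => pv.2)).count k : Nat) : Int)))).sum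
      = (pos.map (fun pv => pvChipScore bolsa letras pv.2)).sum := by
    have h := pv_sum_count_ofList (fun k => pvChipScore bolsa letras k) (pos.map (fun pv => pv.2))
    rw [List.map_map] at h
    simpa [Function.comp] using h
  rw [hbase,
    pv_sum_swap pos cas (fun c => if pvModificador c < 10 then pvModificador c else 0) hpos hcas,
    pv_sum_swap pos cas (fun c => if pvModificador c < 10 then 0 else PySem.Int.mod (pvModificador c) 10) hpos hcas]
  simp only [zero_add]
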